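-- pv_equiv track=rewrite | github.com/pypi-data/pypi-mirror-239 | packages/invoke-api/invoke_api-0.5.0.tar.gz/invoke_api-0.5.0/invoke_api/aliapi.py | get_canonicalized_headers
-- ===== SOURCE A (Python) =====
-- def to_str(val):
--     if val is None:
--         return val
--
--     if isinstance(val, bytes):
--         return str(val, encoding='utf-8')
--     else:
--         return str(val)
--
-- def get_canonicalized_headers(headers):
--     canon_keys = []
--     tmp_headers = {}
--     for k, v in headers.items():
--         if v is not None:
--             if k.lower() not in canon_keys:
--                 canon_keys.append(k.lower())
--                 tmp_headers[k.lower()] = [to_str(v).strip()]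
--             else:
--                 tmp_headers[k.lower()].append(to_str(v).strip())
--
--     canon_keys.sort()
--     canonical_headers = ''
--     for key in canon_keys:
--         header_entry = ','.join(sorted(tmp_headers[key]))
--         s = f'{key}:{header_entry}\n'
--         canonical_headers += s
--     return canonical_headers, ';'.join(canon_keys)
-- ===== SOURCE B (Python) =====
-- def get_canonicalized_headers(headers):
--     pairs = [(k.lower(), v.strip()) for k, v in headers.items() if v is not None]
--     pairs.sort(key=lambda p: p[1])
--     pairs.sort(key=lambda p: p[0])   # stable: within each key, values stay sorted
--     groups = []                      # list of (key, [values]); keys distinct, in sorted order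
--     for k, v in pairs:
--         if groups and groups[-1][0] == k:
--             groups[-1][1].append(v)
--         else:
--             groups.append((k, [v]))
--     canonical = ''.join(f'{k}:{",".join(vs)}\n' for k, vs in groups)
--     return canonical, ';'.join(k for k, _ in groups)
-- ===== Notes on version B (the rewrite author's own statement) =====
-- stated objective: faster
-- what changed: A builds an ordered key list plus a grouping dict in one pass (with a linear 'k.lower() not in canon_keys' scan per header) and sorts each key's value list separately; B presorts the (lowercased key, stripped value) pairs with two stable sorts (by value, then by key) and emits the groups in a single adjacent-run scan, so no grouping dict or key list is maintained and the per-key value order falls out of the presort's stability.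
import Mathlib
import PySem

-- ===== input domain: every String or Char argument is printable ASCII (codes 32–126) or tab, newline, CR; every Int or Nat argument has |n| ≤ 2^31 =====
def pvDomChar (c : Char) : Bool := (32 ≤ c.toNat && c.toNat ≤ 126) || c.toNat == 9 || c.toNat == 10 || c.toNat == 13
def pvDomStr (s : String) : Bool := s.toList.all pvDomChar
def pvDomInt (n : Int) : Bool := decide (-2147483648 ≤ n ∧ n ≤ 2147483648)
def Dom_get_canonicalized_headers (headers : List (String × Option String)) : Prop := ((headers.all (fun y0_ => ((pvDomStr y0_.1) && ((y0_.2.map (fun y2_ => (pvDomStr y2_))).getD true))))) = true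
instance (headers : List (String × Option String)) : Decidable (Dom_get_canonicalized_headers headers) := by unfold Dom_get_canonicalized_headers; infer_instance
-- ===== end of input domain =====

-- B replaces A's ordered-key list + grouping dict (A scans the key list per header) by
-- sort-then-group: a stable value sort, a stable key sort, and one adjacent-run scan (objective: faster).

-- ===== PORT A =====
-- loop body of A's 'for k, v in headers.items()' (to_str(v) = v, since the values are str)
def pvStepA (s : List String × PySem.Dict String (List String)) (kv : String × Option String) :
    List String × PySem.Dict String (List String) :=
  match kv.2 with
  | none => s
  | some v =>
    if PySem.Str.lower kv.1 ∉ s.1 then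
      (s.1 ++ [PySem.Str.lower kv.1], s.2.insert (PySem.Str.lower kv.1) [PySem.Str.strip v])
    else
      -- tmp_headers[k.lower()].append(...): the key is present, so the [] default is never used
      (s.1, s.2.modify (PySem.Str.lower kv.1) [] (fun l => l ++ [PySem.Str.strip v]))

def get_canonicalized_headers (headers : List (String × Option String)) : String × String :=
  let st := headers.foldl pvStepA ([], PySem.Dict.empty)
  let canon_keys := PySem.List.sorted st.1 (fun x => x) false
  let canonical := canon_keys.foldl (fun acc key =>
      acc ++ (key ++ ":" ++ PySem.Str.join "," (PySem.List.sorted (st.2.getD key []) (fun x => x) false) ++ "\n")) ""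
  (canonical, PySem.Str.join ";" canon_keys)

-- ===== PORT B =====
-- the comprehension '[(k.lower(), v.strip()) for k, v in headers.items() if v is not None]'
def pvPairB (kv : String × Option String) : Option (String × String) :=
  kv.2.map (fun v => (PySem.Str.lower kv.1, PySem.Str.strip v))

-- Source B's grouping loop; groups are kept most-recent-first (Source B appends at the end and
-- inspects groups[-1]); the fold result is reversed once at the end
def pvStepB (g : List (String × List String)) (p : String × String) : List (String × List String) :=
  match g with
  | (k, vs) :: t => if k = p.1 then (k, vs ++ [p.2]) :: t else (p.1, [p.2]) :: (k, vs) :: t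
  | [] => [(p.1, [p.2])]

def get_canonicalized_headers_alt (headers : List (String × Option String)) : String × String :=
  let pairs := PySem.List.sorted
      (PySem.List.sorted (headers.filterMap pvPairB) (fun p => p.2) false) (fun p => p.1) false
  let groups := (pairs.foldl pvStepB []).reverse
  (PySem.Str.join "" (groups.map (fun g => g.1 ++ ":" ++ PySem.Str.join "," g.2 ++ "\n")),
   PySem.Str.join ";" (groups.map (fun g => g.1)))

-- ===== PRECONDITION & SPEC =====
def Spec_get_canonicalized_headers (headers : List (String × Option String)) (out : String × String) : Prop := out = get_canonicalized_headers_alt headers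
instance (headers : List (String × Option String)) (out : String × String) : Decidable (Spec_get_canonicalized_headers headers out) := by unfold Spec_get_canonicalized_headers; infer_instance

-- ===== CLAIM (what is proved, stated in full; the proofs are below) =====
def Claim_equal_get_canonicalized_headers : Prop := ∀ (headers : List (String × Option String)), Dom_get_canonicalized_headers headers → Spec_get_canonicalized_headers headers (get_canonicalized_headers headers)

-- ===== LEMMAS AND PROOFS =====

-- the processed pair list: lowercased key, stripped value, None entries dropped
def pvP (headers : List (String × Option String)) : List (String × String) :=
  headers.filterMap pvPairB


-- values carried by key c, in list order
def pvVals (P : List (String × String)) (c : String) : List String :=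
  (P.filter (fun p => p.1 = c)).map (fun p => p.2)

def pvStep2 (s : List String × PySem.Dict String (List String)) (p : String × String) :
    List String × PySem.Dict String (List String) :=
  if p.1 ∉ s.1 then (s.1 ++ [p.1], s.2.insert p.1 [p.2])
  else (s.1, s.2.modify p.1 [] (fun l => l ++ [p.2]))

lemma pv_modify_eq (d : PySem.Dict String (List String)) (k : String) (d0 : List String)
    (f : List String → List String) : d.modify k d0 f = d.insert k (f (d.getD k d0)) := rfl

lemma pv_keys (P : List (String × String)) (s : List String × PySem.Dict String (List String)) :
    (P.foldl pvStep2 s).1 = P.foldl (fun ck p => if p.1 ∉ ck then ck ++ [p.1] else ck) s.1 := by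
  induction P generalizing s with
  | nil => rfl
  | cons p t ih => by_cases h : p.1 ∈ s.1 <;> simp [pvStep2, h, ih]

lemma pv_keys_dedup (P : List (String × String)) :
    (P.foldl pvStep2 ([], PySem.Dict.empty)).1 = PySem.List.dedup (P.map (fun p => p.1)) := by
  rw [pv_keys]
  rw [PySem.List.dedup_eq_ofList, PySem.Set.ofList_eq_foldl, List.foldl_map]
  apply PySem.List.foldl_congr_mem
  intro acc x _
  simp [PySem.Set.add]

lemma pv_vals (P : List (String × String)) (s : List String × PySem.Dict String (List String))
    (hinv : ∀ k, k ∉ s.1 → s.2.getD k [] = []) (k : String) :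
    ((P.foldl pvStep2 s).2).getD k [] = s.2.getD k [] ++ pvVals P k := by
  induction P generalizing s with
  | nil => simp [pvVals]
  | cons p t ih =>
    by_cases h : p.1 ∈ s.1
    · have hstep : pvStep2 s p = (s.1, s.2.modify p.1 [] (fun l => l ++ [p.2])) := by
        simp [pvStep2, h]
      rw [List.foldl_cons, hstep, ih]
      · rw [pv_modify_eq, PySem.Dict.getD_insert]
        by_cases hk : k = p.1
        · subst hk; simp [pvVals]
        · have hk' : ¬ p.1 = k := fun hh => hk hh.symm
          simp [pvVals, hk, hk']
      · intro k' hk'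
        rw [pv_modify_eq, PySem.Dict.getD_insert]
        have : ¬ k' = p.1 := fun hh => hk' (hh ▸ h)
        simp only [this, if_false]
        exact hinv k' hk'
    · have hstep : pvStep2 s p = (s.1 ++ [p.1], s.2.insert p.1 [p.2]) := by
        simp [pvStep2, h]
      rw [List.foldl_cons, hstep, ih]
      · rw [PySem.Dict.getD_insert]
        by_cases hk : k = p.1
        · rw [hk] at *; simp [pvVals, hinv p.1 h]
        · have hk' : ¬ p.1 = k := fun hh => hk hh.symm
          simp [pvVals, hk, hk']
      · intro k' hk'
        simp only [List.mem_append, List.mem_singleton, not_or] at hk'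
        rw [PySem.Dict.getD_insert]
        simp only [hk'.2, if_false]
        exact hinv k' hk'.1

lemma pv_foldA (headers : List (String × Option String)) (s : List String × PySem.Dict String (List String)) :
    headers.foldl pvStepA s = (pvP headers).foldl pvStep2 s := by
  induction headers generalizing s with
  | nil => rfl
  | cons kv t ih =>
    obtain ⟨k, v⟩ := kv
    cases v <;> simp [pvP, pvPairB, pvStepA, pvStep2, ih]


lemma pv_foldl_add_of_mem (l : List String) (s : PySem.Set String) (x : String) (hx : x ∈ s) :
    l.foldl PySem.Set.add s = (l.filter (fun y => y ≠ x)).foldl PySem.Set.add s := by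
  induction l generalizing s with
  | nil => rfl
  | cons y t ih =>
    by_cases hy : y = x
    · subst hy
      have : PySem.Set.add s y = s := by simp [PySem.Set.add, hx]
      simp [this, ih s hx]
    · have hx' : x ∈ PySem.Set.add s y := by simp [PySem.Set.mem_add, hx]
      simp [hy, ih _ hx']

lemma pv_foldl_add_cons (t : List String) (s : PySem.Set String) (x : String) (hx : x ∉ t) :
    t.foldl PySem.Set.add (x :: s) = x :: t.foldl PySem.Set.add s := by
  induction t generalizing s with
  | nil => rfl
  | cons y r ih =>
    have hyx : y ≠ x := by rintro rfl; exact hx (List.mem_cons_self ..)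
    have hx' : x ∉ r := fun h => hx (List.mem_cons_of_mem _ h)
    by_cases hy : y ∈ s
    · have h1 : PySem.Set.add (x :: s) y = x :: s := by
        simp [PySem.Set.add, hy]
      have h2 : PySem.Set.add s y = s := by simp [PySem.Set.add, hy]
      simp [List.foldl_cons, h1, h2, ih _ hx']
    · have h1 : PySem.Set.add (x :: s) y = x :: (s ++ [y]) := by
        simp [PySem.Set.add, hy, hyx]
      have h2 : PySem.Set.add s y = s ++ [y] := by simp [PySem.Set.add, hy]
      simp [List.foldl_cons, h1, h2, ih _ hx']

lemma pv_dedup_cons (x : String) (l : List String) :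
    PySem.List.dedup (x :: l) = x :: PySem.List.dedup (l.filter (fun y => y ≠ x)) := by
  have h0 : PySem.List.dedup (x :: l) = l.foldl PySem.Set.add [x] := by
    simp [PySem.List.dedup_eq_ofList, PySem.Set.ofList_eq_foldl, List.foldl_cons]
  rw [h0, pv_foldl_add_of_mem l [x] x (by simp)]
  have hx : x ∉ l.filter (fun y => y ≠ x) := by simp
  have := pv_foldl_add_cons (l.filter (fun y => y ≠ x)) [] x hx
  simp only [] at this ⊢
  rw [show ([x] : List String) = x :: [] from rfl, this]
  simp [PySem.List.dedup_eq_ofList, PySem.Set.ofList_eq_foldl]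

lemma pv_foldl_add_sublist (l : List String) (s : PySem.Set String) :
    (l.foldl PySem.Set.add s).Sublist (s ++ l) := by
  induction l generalizing s with
  | nil => simp
  | cons y t ih =>
    by_cases hy : y ∈ s
    · have h1 : PySem.Set.add s y = s := by simp [PySem.Set.add, hy]
      simp only [List.foldl_cons, h1]
      exact (ih s).trans (by simp)
    · have h1 : PySem.Set.add s y = s ++ [y] := by simp [PySem.Set.add, hy]
      simp only [List.foldl_cons, h1]
      exact (ih _).trans (by simp)

lemma pv_dedup_sublist (l : List String) : (PySem.List.dedup l).Sublist l := by
  have := pv_foldl_add_sublist l []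
  simpa [PySem.List.dedup_eq_ofList, PySem.Set.ofList_eq_foldl] using this


lemma pv_insertBy_split {α : Type} (blt : α → α → Bool) (x : α) (ys : List α) :
    ∃ l r, PySem.List.insertBy blt x ys = l ++ x :: r ∧ ys = l ++ r := by
  induction ys with
  | nil => exact ⟨[], [], rfl, rfl⟩
  | cons y t ih =>
    by_cases h : blt x y
    · exact ⟨[], y :: t, by simp [PySem.List.insertBy, h], rfl⟩
    · obtain ⟨l, r, h1, h2⟩ := ih
      exact ⟨y :: l, r, by simp [PySem.List.insertBy, h, h1], by simp [h2]⟩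

lemma pv_filter_insertBy_ne {α κ : Type} [LinearOrder κ] (key : α → κ) (c : κ) (x : α) (ys : List α)
    (hx : ¬ key x = c) :
    (PySem.List.insertBy (fun a b => decide (key a < key b)) x ys).filter (fun z => key z = c) =
      ys.filter (fun z => key z = c) := by
  obtain ⟨l, r, h1, h2⟩ := pv_insertBy_split (fun a b => decide (key a < key b)) x ys
  rw [h1, h2]
  simp [List.filter_append, hx]

lemma pv_filter_insertBy_eq {α κ : Type} [LinearOrder κ] (key : α → κ) (c : κ) (x : α) (ys : List α)
    (hs : ys.Pairwise (fun a b => key a ≤ key b)) (hx : key x = c) :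
    (PySem.List.insertBy (fun a b => decide (key a < key b)) x ys).filter (fun z => key z = c) =
      ys.filter (fun z => key z = c) ++ [x] := by
  induction ys with
  | nil => simp [PySem.List.insertBy, hx]
  | cons y t ih =>
    rw [List.pairwise_cons] at hs
    by_cases h : key x < key y
    · -- x goes first; nothing in y :: t can have key = c < key y ≤ keys of t
      have hy : ¬ key y = c := fun hc => absurd (h.trans_eq (hc.trans hx.symm)) (lt_irrefl _)
      have ht : ∀ z ∈ t, ¬ key z = c := fun z hz hc =>
        absurd ((h.trans_le (hs.1 z hz)).trans_eq (hc.trans hx.symm)) (lt_irrefl _)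
      have : PySem.List.insertBy (fun a b => decide (key a < key b)) x (y :: t) = x :: y :: t := by
        simp [PySem.List.insertBy, h]
      rw [this]
      have htnil : t.filter (fun z => decide (key z = c)) = [] :=
        List.filter_eq_nil_iff.mpr (by intro z hz; simpa using ht z hz)
      simp [hx, hy, htnil]
    · have : PySem.List.insertBy (fun a b => decide (key a < key b)) x (y :: t) =
          y :: PySem.List.insertBy (fun a b => decide (key a < key b)) x t := by
        simp [PySem.List.insertBy, h]
      rw [this]
      simp only [List.filter_cons]
      rw [ih hs.2]
      by_cases hy : key y = c <;> simp [hy]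

lemma pv_sorted_filter {α κ : Type} [LinearOrder κ] (xs : List α) (key : α → κ) (c : κ) :
    (PySem.List.sorted xs key false).filter (fun z => key z = c) = xs.filter (fun z => key z = c) := by
  induction xs using List.reverseRecOn with
  | nil => rw [PySem.List.sorted_eq_foldl_insertBy]; rfl
  | append_singleton t x ih =>
    have hstep : PySem.List.sorted (t ++ [x]) key false =
        PySem.List.insertBy (fun a b => decide (key a < key b)) x (PySem.List.sorted t key false) := by
      rw [PySem.List.sorted_eq_foldl_insertBy, PySem.List.sorted_eq_foldl_insertBy, List.foldl_append]
      rfl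
    rw [hstep]
    by_cases hx : key x = c
    · rw [pv_filter_insertBy_eq key c x _ (PySem.List.sorted_pairwise t key) hx, ih,
        List.filter_append]
      simp [hx]
    · rw [pv_filter_insertBy_ne key c x _ hx, ih, List.filter_append]
      simp [hx]


def pvGrps (k : String) (vs : List String) : List (String × String) → List (String × List String)
  | [] => [(k, vs)]
  | p :: t => if k = p.1 then pvGrps k (vs ++ [p.2]) t else pvGrps p.1 [p.2] t ++ [(k, vs)]

lemma pv_gather (t : List (String × String)) (k : String) (vs : List String)
    (g : List (String × List String)) :
    t.foldl pvStepB ((k, vs) :: g) = pvGrps k vs t ++ g := by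
  induction t generalizing k vs g with
  | nil => rfl
  | cons p r ih =>
    by_cases h : k = p.1
    · simp [pvStepB, pvGrps, h, ih]
    · simp [pvStepB, pvGrps, h, ih]

lemma pv_grps (t : List (String × String)) (k : String) (vs : List String)
    (hs : t.Pairwise (fun a b => a.1 ≤ b.1)) (hle : ∀ p ∈ t, k ≤ p.1) :
    (pvGrps k vs t).reverse =
      (k, vs ++ pvVals t k) ::
        (PySem.List.dedup ((t.filter (fun p => p.1 ≠ k)).map (fun p => p.1))).map
          (fun c => (c, pvVals t c)) := by
  induction t generalizing k vs with
  | nil => simp [pvGrps, pvVals]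
  | cons p r ih =>
    rw [List.pairwise_cons] at hs
    by_cases h : k = p.1
    · -- p joins the current group
      have hle' : ∀ q ∈ r, k ≤ q.1 := fun q hq => h ▸ hs.1 q hq
      rw [show pvGrps k vs (p :: r) = pvGrps k (vs ++ [p.2]) r by simp [pvGrps, h]]
      rw [ih _ _ hs.2 hle']
      have h1 : pvVals (p :: r) k = p.2 :: pvVals r k := by
        simp [pvVals, h.symm]
      have h2 : (p :: r).filter (fun q => q.1 ≠ k) = r.filter (fun q => q.1 ≠ k) := by
        simp [h.symm]
      rw [h1, h2]
      refine congrArg₂ _ (by simp) (List.map_congr_left ?_)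
      intro c hc
      have hcr : c ∈ (r.filter (fun q => q.1 ≠ k)).map (fun p => p.1) :=
        (PySem.List.mem_dedup _ _).mp hc
      obtain ⟨q, hq, rfl⟩ := List.mem_map.mp hcr
      have hqk : ¬ q.1 = k := by simpa using (List.mem_filter.mp hq).2
      have : pvVals (p :: r) q.1 = pvVals r q.1 := by
        have hpq : ¬ p.1 = q.1 := fun hh => hqk (hh ▸ h.symm ▸ rfl)
        simp [pvVals, hpq]
      simp [this]
    · -- p opens a new group; k never recurs (k < p.1 ≤ every later key)
      have hkp : k < p.1 := lt_of_le_of_ne (hle p (List.mem_cons_self ..)) h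
      have hkr : ∀ q ∈ r, k < q.1 := fun q hq => hkp.trans_le (hs.1 q hq)
      have hvk : pvVals (p :: r) k = [] := by
        apply List.map_eq_nil_iff.mpr
        apply List.filter_eq_nil_iff.mpr
        intro q hq hdec
        rcases List.mem_cons.mp hq with rfl | hq'
        · exact h ((show _ = k by simpa using hdec).symm)
        · exact (hkr q hq').ne' (by simpa using hdec)
      rw [show pvGrps k vs (p :: r) = pvGrps p.1 [p.2] r ++ [(k, vs)] from by
        simp [pvGrps, h]]
      rw [List.reverse_append]
      simp only [List.reverse_singleton, List.singleton_append]
      rw [ih p.1 [p.2] hs.2 hs.1]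
      have hrk : r.filter (fun q => q.1 ≠ k) = r := by
        apply List.filter_eq_self.mpr
        intro q hq; simpa using (hkr q hq).ne'
      have hfk : (p :: r).filter (fun q => q.1 ≠ k) = p :: r := by
        rw [List.filter_cons]
        simp only [hrk, hkp.ne', ne_eq, not_false_iff, decide_true, if_true]
      rw [hvk, hfk]
      simp only [List.map_cons, pv_dedup_cons]
      have hmf : (r.map (fun p => p.1)).filter (fun y => y ≠ p.1) =
          (r.filter (fun q => q.1 ≠ p.1)).map (fun p => p.1) := by
        rw [List.filter_map]; rfl
      rw [hmf]
      have hvp : pvVals (p :: r) p.1 = p.2 :: pvVals r p.1 := by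
        simp [pvVals]
      refine congrArg₂ _ (by simp) (congrArg₂ _ (by simp [hvp]) (List.map_congr_left ?_).symm)
      intro c hc
      obtain ⟨q, hq, rfl⟩ := List.mem_map.mp ((PySem.List.mem_dedup _ _).mp hc)
      have hqp : ¬ q.1 = p.1 := by simpa using (List.mem_filter.mp hq).2
      have hpq : ¬ p.1 = q.1 := fun hh => hqp hh.symm
      have : pvVals (p :: r) q.1 = pvVals r q.1 := by
        simp [pvVals, hpq]
      simp [this]


lemma pv_join_cons (p : String) (ps : List String) :
    PySem.Str.join "" (p :: ps) = p ++ PySem.Str.join "" ps := by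
  apply String.toList_inj.mp
  rw [PySem.Str.toList_join, String.toList_append, PySem.Str.toList_join]
  show PySem.Chars.join [] _ = _
  cases ps with
  | nil => simp [PySem.Chars.join, List.intercalate]
  | cons q qs =>
    show List.intercalate [] _ = _
    simp [List.intercalate, PySem.Chars.join]

lemma pv_foldl_str {α : Type} (l : List α) (f : α → String) (a : String) :
    l.foldl (fun acc k => acc ++ f k) a = a ++ PySem.Str.join "" (l.map f) := by
  induction l generalizing a with
  | nil =>
    show a = a ++ PySem.Str.join "" []
    have : PySem.Str.join "" ([] : List String) = "" := rfl
    simp [this]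
  | cons x t ih =>
    simp only [List.foldl_cons, List.map_cons, ih, pv_join_cons, String.append_assoc]


-- B's sorted pair list (proof-side name for the expression in the B port)
def pvQ (P : List (String × String)) : List (String × String) :=
  PySem.List.sorted (PySem.List.sorted P (fun p => p.2) false) (fun p => p.1) false

-- A's per-key value sort equals B's within-group order (stability of the two-pass sort)
lemma pv_sorted_vals (P : List (String × String)) (c : String) :
    PySem.List.sorted (pvVals P c) (fun x => x) false = pvVals (pvQ P) c := by
  have hQf : (pvQ P).filter (fun p => p.1 = c) =
      (PySem.List.sorted P (fun p => p.2) false).filter (fun p => p.1 = c) :=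
    pv_sorted_filter (PySem.List.sorted P (fun p => p.2) false) (fun p : String × String => p.1) c
  apply PySem.List.sorted_id_eq_of_perm_of_pairwise
  · show (pvVals (pvQ P) c).Perm (pvVals P c)
    unfold pvVals
    rw [hQf]
    exact (((PySem.List.sorted_perm P (fun p => p.2) false).filter _).map _)
  · show (pvVals (pvQ P) c).Pairwise (· ≤ ·)
    unfold pvVals
    rw [hQf]
    exact List.pairwise_map.mpr ((PySem.List.sorted_pairwise P (fun p => p.2)).filter _)

-- B's grouping of the sorted pairs, key list made explicit
lemma pv_groups (q : String × String) (t : List (String × String))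
    (hs : (q :: t).Pairwise (fun a b => a.1 ≤ b.1)) :
    ((q :: t).foldl pvStepB []).reverse =
      (q.1 :: PySem.List.dedup ((t.filter (fun p => p.1 ≠ q.1)).map (fun p => p.1))).map
        (fun c => (c, pvVals (q :: t) c)) := by
  rw [List.pairwise_cons] at hs
  rw [List.foldl_cons, show pvStepB [] q = [(q.1, [q.2])] from rfl, pv_gather, List.append_nil]
  rw [pv_grps t q.1 [q.2] hs.2 hs.1, List.map_cons]
  have hhead : pvVals (q :: t) q.1 = [q.2] ++ pvVals t q.1 := by
    simp [pvVals]
  rw [hhead]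
  refine congrArg₂ _ rfl (List.map_congr_left ?_)
  intro c hc
  obtain ⟨p, hp, rfl⟩ := List.mem_map.mp ((PySem.List.mem_dedup _ _).mp hc)
  have hpq : ¬ p.1 = q.1 := by simpa using (List.mem_filter.mp hp).2
  have hq1 : ¬ q.1 = p.1 := fun hh => hpq hh.symm
  simp [pvVals, hq1]

-- A's sorted key list equals B's group-key list
lemma pv_SK (P : List (String × String)) (q : String × String) (t : List (String × String))
    (hQ : pvQ P = q :: t) :
    PySem.List.sorted (PySem.List.dedup (P.map (fun p => p.1))) (fun x => x) false =
      q.1 :: PySem.List.dedup ((t.filter (fun p => p.1 ≠ q.1)).map (fun p => p.1)) := by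
  have hQs : (pvQ P).Pairwise (fun a b => a.1 ≤ b.1) := PySem.List.sorted_pairwise _ _
  have hperm : (pvQ P).Perm P :=
    (PySem.List.sorted_perm _ _ _).trans (PySem.List.sorted_perm _ _ _)
  rw [hQ, List.pairwise_cons] at hQs
  have hmemt : ∀ c, c ∈ PySem.List.dedup ((t.filter (fun p => p.1 ≠ q.1)).map (fun p => p.1)) →
      ∃ p ∈ t, p.1 = c ∧ c ≠ q.1 := by
    intro c hc
    obtain ⟨p, hp, rfl⟩ := List.mem_map.mp ((PySem.List.mem_dedup _ _).mp hc)
    have := List.mem_filter.mp hp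
    exact ⟨p, this.1, rfl, by simpa using this.2⟩
  have hlt : ∀ c, c ∈ PySem.List.dedup ((t.filter (fun p => p.1 ≠ q.1)).map (fun p => p.1)) →
      q.1 < c := by
    intro c hc
    obtain ⟨p, hpt, rfl, hne⟩ := hmemt c hc
    exact lt_of_le_of_ne (hQs.1 p hpt) (fun hh => hne hh.symm)
  apply PySem.List.sorted_eq_of_perm_of_pairwise_lt
  · apply List.perm_of_nodup_nodup_toFinset_eq
    · exact List.nodup_cons.mpr ⟨fun hc => (hlt _ hc).ne rfl, PySem.List.nodup_dedup _⟩
    · exact PySem.List.nodup_dedup _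
    · ext c
      simp only [List.mem_toFinset, List.mem_cons, PySem.List.mem_dedup, List.mem_map]
      constructor
      · rintro (rfl | ⟨p, hp, rfl⟩)
        · exact ⟨q, hperm.mem_iff.mp (hQ ▸ List.mem_cons_self ..), rfl⟩
        · exact ⟨p, hperm.mem_iff.mp (hQ ▸ List.mem_cons_of_mem _ (List.mem_filter.mp hp).1), rfl⟩
      · rintro ⟨p, hp, rfl⟩
        have hpQ : p ∈ q :: t := hQ ▸ hperm.mem_iff.mpr hp
        rcases List.mem_cons.mp hpQ with rfl | hpt
        · exact Or.inl rfl
        · by_cases hpq : p.1 = q.1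
          · exact Or.inl hpq
          · exact Or.inr ⟨p, List.mem_filter.mpr ⟨hpt, by simpa using hpq⟩, rfl⟩
  · refine List.pairwise_cons.mpr ⟨hlt, ?_⟩
    have hsub := pv_dedup_sublist ((t.filter (fun p => p.1 ≠ q.1)).map (fun p => p.1))
    have hle : (PySem.List.dedup ((t.filter (fun p => p.1 ≠ q.1)).map (fun p => p.1))).Pairwise
        (· ≤ ·) :=
      (List.pairwise_map.mpr (hQs.2.filter _)).sublist hsub
    have hne : (PySem.List.dedup ((t.filter (fun p => p.1 ≠ q.1)).map (fun p => p.1))).Pairwise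
        (· ≠ ·) := PySem.List.nodup_dedup _
    exact (hle.and hne).imp (fun h => lt_of_le_of_ne h.1 h.2)

-- ===== VERDICT (by name: the statement is the Claim_ definition above) =====
theorem get_canonicalized_headers_spec : Claim_equal_get_canonicalized_headers := by
  intro headers _
  unfold Spec_get_canonicalized_headers get_canonicalized_headers get_canonicalized_headers_alt
  dsimp only
  rw [pv_foldA, show headers.filterMap pvPairB = pvP headers from rfl]
  rw [show PySem.List.sorted (PySem.List.sorted (pvP headers) (fun p => p.2) false)
      (fun p => p.1) false = pvQ (pvP headers) from rfl]
  rw [pv_keys_dedup]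
  have hvals := pv_vals (pvP headers) ([], PySem.Dict.empty) (fun k _ => rfl)
  have hemp : ∀ k : String, (PySem.Dict.empty : PySem.Dict String (List String)).getD k [] = [] :=
    fun _ => rfl
  simp only [hemp, List.nil_append] at hvals
  simp only [hvals, pv_sorted_vals]
  cases hQ : pvQ (pvP headers) with
  | nil =>
    have hPnil : pvP headers = [] :=
      (PySem.List.sorted_eq_nil_iff _ _ _).mp ((PySem.List.sorted_eq_nil_iff _ _ _).mp hQ)
    rw [hPnil]
    rfl
  | cons q t =>
    have hQs : (pvQ (pvP headers)).Pairwise (fun a b => a.1 ≤ b.1) :=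
      PySem.List.sorted_pairwise _ _
    rw [pv_SK (pvP headers) q t hQ, pv_groups q t (hQ ▸ hQs)]
    refine congrArg₂ _ ?_ ?_
    · -- canonical string component
      rw [pv_foldl_str _ (fun key => key ++ ":" ++
          PySem.Str.join "," (pvVals (q :: t) key) ++ "\n") "", List.map_map]
      rfl
    · -- key-join component
      rw [List.map_map,
        show ((fun (g : String × List String) => g.1) ∘ fun c => (c, pvVals (q :: t) c)) =
          fun c => c from rfl,
        List.map_id']
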